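-- pv_equiv track=rewrite | github.com/MaximNuhumanov/algorithms | UnimodMax.py | unimodMax
-- ===== SOURCE A (Python) =====
-- def unimodMax(A, right, left = 0):
--     if right == left:
--         return A[left]
--     mid = (right+left)//2
--
--     if A[mid] > A[mid + 1]:
--         right = mid
--     else:
--         left = mid + 1
--     max = unimodMax(A,right,left)
--     return max
-- ===== SOURCE B (Python) =====
-- def unimodMax(A, right, left=0):
--     # Iterative, stack-free version: the (lo, hi) window is narrowed by a pure
--     # step applied a bounded number of times (hi-lo shrinks each active step,
--     # so max(right-left, 0) rounds always suffice to reach lo == hi).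
--     lo, hi = left, right
--     for _ in range(max(right - left, 0)):
--         if lo < hi:
--             mid = (lo + hi) // 2
--             if A[mid] <= A[mid + 1]:
--                 lo = mid + 1
--             else:
--                 hi = mid
--     return A[lo]
-- ===== Notes on version B (the rewrite author's own statement) =====
-- stated objective: alternative
-- what changed: The recursion is replaced by a bounded for-loop applying a pure window-narrowing step (state (lo,hi), dual comparison A[mid] <= A[mid+1]) a fixed number of rounds, with no recursive calls and no call-stack growth.
-- outside the precondition, e.g. on unimodMax([1, 2, 3], 1, -5): A returns 2, B returns 2
import Mathlib
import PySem

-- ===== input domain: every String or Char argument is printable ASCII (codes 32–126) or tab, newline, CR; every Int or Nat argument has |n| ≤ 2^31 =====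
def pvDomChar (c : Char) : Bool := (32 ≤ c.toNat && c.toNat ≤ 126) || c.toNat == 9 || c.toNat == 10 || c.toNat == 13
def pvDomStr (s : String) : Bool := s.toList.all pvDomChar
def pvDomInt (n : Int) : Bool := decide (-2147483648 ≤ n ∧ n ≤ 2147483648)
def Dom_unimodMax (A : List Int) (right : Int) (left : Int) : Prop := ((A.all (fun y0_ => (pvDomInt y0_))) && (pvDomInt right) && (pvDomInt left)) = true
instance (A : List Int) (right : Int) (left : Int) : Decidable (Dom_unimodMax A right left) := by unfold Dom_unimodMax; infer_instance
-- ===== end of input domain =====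

-- B replaces A's recursion by a bounded for-loop applying a pure window-narrowing step (same binary narrowing, no recursion); equivalence proved on left ≤ right with the whole window in index range.


-- ===== PORT A =====
-- Transliteration of A's recursion; the Nat fuel (right-left).toNat+1 is only a
-- totality guard — inside Pre_ it never runs out (each call shrinks right-left).
def unimodMaxFuelA (fuel : Nat) (A : List Int) (right : Int) (left : Int) : Int :=
  match fuel with
  | 0 => 0
  | f + 1 =>
    if right = left then (PySem.List.pyGet? A left).getD 0
    else
      let mid := PySem.Int.floordiv (right + left) 2
      if (PySem.List.pyGet? A mid).getD 0 > (PySem.List.pyGet? A (mid + 1)).getD 0 then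
        unimodMaxFuelA f A mid left
      else
        unimodMaxFuelA f A right (mid + 1)

def unimodMax (A : List Int) (right : Int) (left : Int) : Int :=
  unimodMaxFuelA ((right - left).toNat + 1) A right left

-- ===== PORT B =====
-- B's loop body as a pure step on the state (lo, hi); a no-op once lo = hi.
def unimodStepB (A : List Int) (st : Int × Int) : Int × Int :=
  if st.1 < st.2 then
    let mid := PySem.Int.floordiv (st.1 + st.2) 2
    if (PySem.List.pyGet? A mid).getD 0 ≤ (PySem.List.pyGet? A (mid + 1)).getD 0 then
      (mid + 1, st.2)
    else
      (st.1, mid)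
  else st

-- Transliteration of B: 'for _ in range(max(right-left, 0)):' applies the step
-- once per round (the iteration count bounds the rounds; the step ignores the
-- round index, so the fold over the range applies it length-many times).
def unimodMax_alt (A : List Int) (right : Int) (left : Int) : Int :=
  let st := (PySem.List.pyRange 0 (max (right - left) 0) 1).foldl
              (fun s _ => unimodStepB A s) (left, right)
  (PySem.List.pyGet? A st.1).getD 0

-- ===== PRECONDITION & SPEC =====
-- Pre_ excludes right < left, where A recurses forever (RecursionError), and windows
-- reaching outside Python's index range [-len, len), where A in general raises
-- IndexError (a few such inputs happen to return via negative-index wraparound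
-- before leaving the range; they are excluded with the rest of that region).
def Pre_unimodMax (A : List Int) (right : Int) (left : Int) : Prop :=
  left ≤ right ∧ -(A.length : Int) ≤ left ∧ right < (A.length : Int)
instance (A : List Int) (right : Int) (left : Int) : Decidable (Pre_unimodMax A right left) := by
  unfold Pre_unimodMax; infer_instance

def pvWitness_unimodMax : List Int × Int × Int := ([1, 3, 2], 2, 0)

def Spec_unimodMax (A : List Int) (right : Int) (left : Int) (out : Int) : Prop := out = unimodMax_alt A right left
instance (A : List Int) (right : Int) (left : Int) (out : Int) : Decidable (Spec_unimodMax A right left out) := by unfold Spec_unimodMax; infer_instance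

-- ===== CLAIM (what is proved, stated in full; the proofs are below) =====
def Claim_equal_unimodMax : Prop := ∀ (A : List Int) (right : Int) (left : Int), Dom_unimodMax A right left → Pre_unimodMax A right left → Spec_unimodMax A right left (unimodMax A right left)

-- ===== LEMMAS AND PROOFS =====

-- A fold over any list by a function that ignores the elements is an iterate.
theorem foldl_const_eq_iterate {α β : Type} (g : α → α) (l : List β) (init : α) :
    l.foldl (fun s _ => g s) init = g^[l.length] init := by
  induction l generalizing init with
  | nil => rfl
  | cons x xs ih => simp [List.foldl, ih, Function.iterate_succ_apply]

-- Core: with enough fuel and rounds, A's recursion from (right, left) returns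
-- exactly A[lo] for the lo reached by iterating B's step from (left, right).
theorem unimodMaxFuelA_eq_iter (A : List Int) :
    ∀ (n fuel : Nat) (lo hi : Int), lo ≤ hi → (hi - lo).toNat ≤ n → (hi - lo).toNat < fuel →
      unimodMaxFuelA fuel A hi lo
        = (PySem.List.pyGet? A ((unimodStepB A)^[n] (lo, hi)).1).getD 0 := by
  intro n
  induction n with
  | zero =>
    intro fuel lo hi hle hn hfuel
    obtain ⟨f, rfl⟩ : ∃ f, fuel = f + 1 := ⟨fuel - 1, by omega⟩
    have : hi = lo := by omega
    simp [unimodMaxFuelA, this]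
  | succ n ih =>
    intro fuel lo hi hle hn hfuel
    obtain ⟨f, rfl⟩ : ∃ f, fuel = f + 1 := ⟨fuel - 1, by omega⟩
    by_cases heq : hi = lo
    · have hfix : unimodStepB A (lo, hi) = (lo, hi) := by
        simp [unimodStepB, heq]
      rw [Function.iterate_fixed hfix]
      simp [unimodMaxFuelA, heq]
    · have hlt : lo < hi := lt_of_le_of_ne hle (fun h => heq h.symm)
      have hmid : lo ≤ PySem.Int.floordiv (hi + lo) 2 ∧ PySem.Int.floordiv (hi + lo) 2 < hi := by
        have h2 : PySem.Int.floordiv (hi + lo) 2 = (hi + lo) / 2 := by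
          simp [PySem.Int.floordiv, Int.fdiv_eq_ediv]
        rw [h2]; omega
      rw [Function.iterate_succ_apply]
      have hstep : unimodStepB A (lo, hi) =
          if (PySem.List.pyGet? A (PySem.Int.floordiv (hi + lo) 2)).getD 0
              ≤ (PySem.List.pyGet? A (PySem.Int.floordiv (hi + lo) 2 + 1)).getD 0 then
            (PySem.Int.floordiv (hi + lo) 2 + 1, hi)
          else
            (lo, PySem.Int.floordiv (hi + lo) 2) := by
        simp only [unimodStepB, if_pos hlt]
        rw [Int.add_comm lo hi]
      simp only [unimodMaxFuelA, if_neg (fun h : hi = lo => heq h)]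
      rw [hstep]
      by_cases hcmp : (PySem.List.pyGet? A (PySem.Int.floordiv (hi + lo) 2)).getD 0
          ≤ (PySem.List.pyGet? A (PySem.Int.floordiv (hi + lo) 2 + 1)).getD 0
      · rw [if_neg (by omega), if_pos hcmp]
        exact ih f _ hi (by omega) (by omega) (by omega)
      · rw [if_pos (by omega), if_neg hcmp]
        have h1 := hmid.1
        have h2 := hmid.2
        exact ih f lo _ h1 (by omega) (by omega)

-- ===== VERDICT (by name: the statement is the Claim_ definition above) =====
theorem unimodMax_spec : Claim_equal_unimodMax := by
  intro A r l _ hpre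
  unfold Spec_unimodMax unimodMax unimodMax_alt
  rw [foldl_const_eq_iterate, PySem.List.length_pyRange_one]
  have : (max (r - l) 0 - 0).toNat = (r - l).toNat := by omega
  rw [this]
  exact unimodMaxFuelA_eq_iter A _ _ l r hpre.1 le_rfl (by omega)
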